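-- pv_equiv track=rewrite | github.com/LucaTheSorcerer/PythonUniProjects | coding_exercises/matrices/781.py | sum_of_four_zones
-- ===== SOURCE A (Python) =====
-- matrix = [
--     [3, 1, 8, 5, 4],
--     [7, 8, 5, 1, 2],
--     [2, 2, 6, 7 ,3],
--     [9, 8 ,1 ,3 ,6],
--     [7, 5, 3, 1, 7]
-- ]
--
-- def sum_of_four_zones(matrix):
--     """
--     This function calculates the sum of the four zone marked by the two diagonals (N, S, W, E)
--     :param matrix: matrix as input
--     :return: returns the sum of every zone in a list
--     """
--     sum_nord = 0
--     sum_south = 0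
--     sum_east = 0
--     sum_west = 0
--     list_of_sums = []
--     for i in range(len(matrix)):
--         for j in range(len(matrix)):
--             #For nord
--             if i < j and i + j < len(matrix) -1:
--                 sum_nord += matrix[i][j]
--
--             #For south
--             elif i > j and i + j > len(matrix)-1:
--                 sum_south += matrix[i][j]
--
--             elif i > j and i + j < len(matrix)-1:
--                 sum_west += matrix[i][j]
--
--             elif i < j and i + j > len(matrix)-1:
--                 sum_east += matrix[i][j]
--     list_of_sums.append(sum_nord)
--     list_of_sums.append(sum_south)
--     list_of_sums.append(sum_west)
--     list_of_sums.append(sum_east)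
--
--     list_of_sums.sort()
--     return list_of_sums
-- ===== SOURCE B (Python) =====
-- def sum_of_four_zones(matrix):
--     """Same four zone sums, computed per row from closed-form slice bounds
--     instead of per-cell branching over all (i, j) pairs."""
--     n = len(matrix)
--     north = south = west = east = 0
--     for i, row in enumerate(matrix):
--         north += sum(row[i + 1 : n - 1 - i])
--         south += sum(row[n - i : i])
--         west += sum(row[0 : min(i, n - 1 - i)])
--         east += sum(row[max(i, n - 1 - i) + 1 : n])
--     return sorted([north, south, west, east])
-- ===== Notes on version B (the rewrite author's own statement) =====
-- stated objective: faster
-- what changed: B replaces the O(n^2) per-cell if/elif classification over all (i,j) pairs by a single pass over the rows that takes each zone's cells as one closed-form slice per row and sums it.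
import Mathlib
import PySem

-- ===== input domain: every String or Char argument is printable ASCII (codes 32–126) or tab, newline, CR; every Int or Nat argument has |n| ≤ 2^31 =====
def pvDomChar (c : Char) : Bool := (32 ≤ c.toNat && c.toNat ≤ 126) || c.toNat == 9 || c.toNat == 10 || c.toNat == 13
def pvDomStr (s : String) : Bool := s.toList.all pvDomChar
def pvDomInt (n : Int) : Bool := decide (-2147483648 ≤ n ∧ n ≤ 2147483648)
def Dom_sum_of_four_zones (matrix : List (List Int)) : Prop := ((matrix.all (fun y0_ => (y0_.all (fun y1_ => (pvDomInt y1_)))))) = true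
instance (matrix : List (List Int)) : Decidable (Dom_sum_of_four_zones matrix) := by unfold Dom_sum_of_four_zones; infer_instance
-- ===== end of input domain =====

-- B computes each zone's contribution per row from closed-form slice bounds instead of branching
-- over every (i, j) cell; same four sums, same sorted output (objective: faster by a constant factor).

-- ===== PORT A =====
def sum_of_four_zones (matrix : List (List Int)) : List Int :=
  let n : Int := matrix.length
  let s : Int × Int × Int × Int :=
    (PySem.List.pyRange 0 n 1).foldl (fun s i =>
      (PySem.List.pyRange 0 n 1).foldl (fun (s : Int × Int × Int × Int) j =>
        if i < j ∧ i + j < n - 1 then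
          (s.1 + PySem.List.pyGetD (PySem.List.pyGetD matrix i []) j 0, s.2.1, s.2.2.1, s.2.2.2)
        else if i > j ∧ i + j > n - 1 then
          (s.1, s.2.1 + PySem.List.pyGetD (PySem.List.pyGetD matrix i []) j 0, s.2.2.1, s.2.2.2)
        else if i > j ∧ i + j < n - 1 then
          (s.1, s.2.1, s.2.2.1 + PySem.List.pyGetD (PySem.List.pyGetD matrix i []) j 0, s.2.2.2)
        else if i < j ∧ i + j > n - 1 then
          (s.1, s.2.1, s.2.2.1, s.2.2.2 + PySem.List.pyGetD (PySem.List.pyGetD matrix i []) j 0)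
        else s) s) (0, 0, 0, 0)
  PySem.List.sorted [s.1, s.2.1, s.2.2.1, s.2.2.2] id false

-- ===== PORT B =====
def sum_of_four_zones_alt (matrix : List (List Int)) : List Int :=
  let n : Int := matrix.length
  let s : Int × Int × Int × Int :=
    (PySem.List.enumerate matrix).foldl (fun (s : Int × Int × Int × Int) p =>
      (s.1 + (PySem.List.slice p.2 (some (p.1 + 1)) (some (n - 1 - p.1))).sum,
       s.2.1 + (PySem.List.slice p.2 (some (n - p.1)) (some p.1)).sum,
       s.2.2.1 + (PySem.List.slice p.2 (some 0) (some (min p.1 (n - 1 - p.1)))).sum,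
       s.2.2.2 + (PySem.List.slice p.2 (some (max p.1 (n - 1 - p.1) + 1)) (some n)).sum)) (0, 0, 0, 0)
  PySem.List.sorted [s.1, s.2.1, s.2.2.1, s.2.2.2] id false

-- ===== PRECONDITION & SPEC =====
-- the number of leading cells of row i that A reads (via matrix[i][j]); beyond it A raises IndexError
def pvNeed (n i : Nat) : Nat := if n ≤ 2 then 0 else if i = 0 ∨ i = n - 1 then n - 1 else n

-- Pre_ excludes exactly the inputs on which A raises IndexError: some row i shorter than the cells A reads there
def Pre_sum_of_four_zones (matrix : List (List Int)) : Prop :=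
  ∀ i, i < matrix.length → pvNeed matrix.length i ≤ (matrix.getD i []).length
instance (matrix : List (List Int)) : Decidable (Pre_sum_of_four_zones matrix) := by
  unfold Pre_sum_of_four_zones; infer_instance

def pvWitness_sum_of_four_zones : List (List Int) :=
  [[3, 1, 8], [7, 8, 5], [2, 2, 6]]

def Spec_sum_of_four_zones (matrix : List (List Int)) (out : List Int) : Prop := out = sum_of_four_zones_alt matrix
instance (matrix : List (List Int)) (out : List Int) : Decidable (Spec_sum_of_four_zones matrix out) := by unfold Spec_sum_of_four_zones; infer_instance

-- ===== CLAIM (what is proved, stated in full; the proofs are below) =====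
def Claim_equal_sum_of_four_zones : Prop := ∀ (matrix : List (List Int)), Dom_sum_of_four_zones matrix → Pre_sum_of_four_zones matrix → Spec_sum_of_four_zones matrix (sum_of_four_zones matrix)

-- ===== LEMMAS AND PROOFS =====

-- a fold whose step adds a per-element amount to each of the four components
theorem pv_foldl_add4 {α : Type} (f1 f2 f3 f4 : α → Int) (js : List α) (s : Int × Int × Int × Int) :
    js.foldl (fun s j => (s.1 + f1 j, s.2.1 + f2 j, s.2.2.1 + f3 j, s.2.2.2 + f4 j)) s
      = (s.1 + (js.map f1).sum, s.2.1 + (js.map f2).sum,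
         s.2.2.1 + (js.map f3).sum, s.2.2.2 + (js.map f4).sum) := by
  induction js generalizing s with
  | nil => simp
  | cons x xs ih =>
      simp [ih]
      refine ⟨by ring, by ring, by ring, by ring⟩

theorem pv_sum_range_of_zero_tail (v : Nat → Int) (B N : Nat) (h : B ≤ N)
    (hv : ∀ k, B ≤ k → v k = 0) :
    ((List.range N).map v).sum = ((List.range B).map v).sum := by
  induction N with
  | zero => interval_cases B; rfl
  | succ N ih =>
      rcases Nat.lt_or_ge B (N + 1) with hB | hB
      · rw [List.range_succ]
        simp [hv N (by omega), ih (by omega)]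
      · have : B = N + 1 := by omega
        subst this; rfl

theorem pv_sum_range_ge_eq_slice (row : List Int) (A B : Nat)
    (h : B ≤ A ∨ B ≤ row.length) :
    ((List.range B).map (fun k => if A ≤ k then row.getD k 0 else 0)).sum
      = ((row.drop A).take (B - A)).sum := by
  induction B with
  | zero => simp
  | succ B ih =>
      rw [List.range_succ, List.map_append, List.sum_append]
      by_cases hA : A ≤ B
      · have hlen : B < row.length := by omega
        have h1 : B + 1 - A = (B - A) + 1 := by omega
        rw [h1, List.take_add_one, List.sum_append]
        have h2 : (row.drop A)[B - A]? = some row[B] := by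
          rw [List.getElem?_drop]
          have : A + (B - A) = B := by omega
          rw [this, List.getElem?_eq_getElem hlen]
        rw [ih (Or.inr (by omega))]
        simp [hA, h2, List.getElem?_eq_getElem hlen]
      · rw [ih (Or.inl (by omega))]
        simp [hA, show B - A = 0 by omega, show B + 1 - A = 0 by omega]

theorem pv_sum_ite_interval (row : List Int) (n a b : Int)
    (ha : 0 ≤ a) (hb : 0 ≤ b) (hbn : b ≤ n)
    (hlen : b ≤ a ∨ b ≤ (row.length : Int)) :
    ((PySem.List.pyRange 0 n 1).map (fun j => if a ≤ j ∧ j < b then PySem.List.pyGetD row j 0 else 0)).sum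
      = (PySem.List.slice row (some a) (some b)).sum := by
  rw [PySem.List.slice_toNat row ha hb, PySem.List.pyRange_one, List.map_map]
  have hstep : ((List.range (n - 0).toNat).map
      ((fun j => if a ≤ j ∧ j < b then PySem.List.pyGetD row j 0 else 0) ∘ fun k : Nat => 0 + (k : Int)))
      = (List.range (n - 0).toNat).map
        (fun k : Nat => if a.toNat ≤ k ∧ k < b.toNat then row.getD k 0 else 0) := by
    refine List.map_congr_left (fun k _ => ?_)
    have hiff : (a ≤ (k : Int) ∧ (k : Int) < b) ↔ (a.toNat ≤ k ∧ k < b.toNat) := by omega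
    simp only [Function.comp, zero_add, hiff, PySem.List.pyGetD_natCast]
  rw [hstep,
    pv_sum_range_of_zero_tail _ b.toNat _ (by omega)
      (fun k hk => if_neg (by omega)),
    List.map_congr_left (l := List.range b.toNat)
      (g := fun k : Nat => if a.toNat ≤ k then row.getD k 0 else 0)
      (fun k hk => by
        rw [List.mem_range] at hk
        simp only [show (a.toNat ≤ k ∧ k < b.toNat) ↔ a.toNat ≤ k from by omega]),
    pv_sum_range_ge_eq_slice row a.toNat b.toNat (by omega)]

-- rewrite a guarded per-cell sum over range(n) as one zone slice
theorem pv_zone (row : List Int) (n a b : Int) (P : Int → Prop) [DecidablePred P]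
    (hP : ∀ j, 0 ≤ j → j < n → (P j ↔ (a ≤ j ∧ j < b))) (ha : 0 ≤ a) (hb : 0 ≤ b) (hbn : b ≤ n)
    (hlen : b ≤ a ∨ b ≤ (row.length : Int)) :
    ((PySem.List.pyRange 0 n 1).map (fun j => if P j then PySem.List.pyGetD row j 0 else 0)).sum
      = (PySem.List.slice row (some a) (some b)).sum := by
  rw [List.map_congr_left
      (g := fun j => if a ≤ j ∧ j < b then PySem.List.pyGetD row j 0 else 0)
      (fun j hj => by
        rw [PySem.List.mem_pyRange_one] at hj
        simp only [hP j hj.1 hj.2]),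
    pv_sum_ite_interval row n a b ha hb hbn hlen]

-- ===== VERDICT (by name: the statement is the Claim_ definition above) =====
theorem sum_of_four_zones_spec : Claim_equal_sum_of_four_zones := by
  intro matrix _ hpre
  unfold Spec_sum_of_four_zones sum_of_four_zones sum_of_four_zones_alt
  set n : Int := (matrix.length : Int) with hn
  -- A's inner if/elif chain adds one guarded amount per component
  have hstepA : ∀ i : Int,
      (fun (s : Int × Int × Int × Int) j =>
        if i < j ∧ i + j < n - 1 then
          (s.1 + PySem.List.pyGetD (PySem.List.pyGetD matrix i []) j 0, s.2.1, s.2.2.1, s.2.2.2)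
        else if i > j ∧ i + j > n - 1 then
          (s.1, s.2.1 + PySem.List.pyGetD (PySem.List.pyGetD matrix i []) j 0, s.2.2.1, s.2.2.2)
        else if i > j ∧ i + j < n - 1 then
          (s.1, s.2.1, s.2.2.1 + PySem.List.pyGetD (PySem.List.pyGetD matrix i []) j 0, s.2.2.2)
        else if i < j ∧ i + j > n - 1 then
          (s.1, s.2.1, s.2.2.1, s.2.2.2 + PySem.List.pyGetD (PySem.List.pyGetD matrix i []) j 0)
        else s)
      = (fun (s : Int × Int × Int × Int) j =>
        (s.1 + (if i < j ∧ i + j < n - 1 then PySem.List.pyGetD (PySem.List.pyGetD matrix i []) j 0 else 0),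
         s.2.1 + (if i > j ∧ i + j > n - 1 then PySem.List.pyGetD (PySem.List.pyGetD matrix i []) j 0 else 0),
         s.2.2.1 + (if i > j ∧ i + j < n - 1 then PySem.List.pyGetD (PySem.List.pyGetD matrix i []) j 0 else 0),
         s.2.2.2 + (if i < j ∧ i + j > n - 1 then PySem.List.pyGetD (PySem.List.pyGetD matrix i []) j 0 else 0))) := by
    intro i
    funext s j
    split_ifs <;> first | (exfalso; omega) | simp
  simp only [hstepA, pv_foldl_add4, zero_add,
    PySem.List.enumerate_eq_map_pyRange matrix [], List.map_map]
  refine congrArg (fun l => PySem.List.sorted l id false) ?_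
  have hlenm : PySem.List.len matrix = n := rfl
  rw [hlenm]
  have hzone : ∀ (i a b : Int) (P : Int → Prop) (inst : DecidablePred P),
      0 ≤ i → i < n →
      (∀ j, 0 ≤ j → j < n → (P j ↔ (a ≤ j ∧ j < b))) → 0 ≤ a → 0 ≤ b → b ≤ n →
      (b ≤ a ∨ b ≤ ((matrix.getD i.toNat []).length : Int)) →
      ((PySem.List.pyRange 0 n 1).map (fun j => if P j then PySem.List.pyGetD (PySem.List.pyGetD matrix i []) j 0 else 0)).sum
        = (PySem.List.slice (PySem.List.pyGetD matrix i []) (some a) (some b)).sum := by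
    intro i a b P inst h0 h1 hP ha hb hbn hlen
    have hit : i.toNat < matrix.length := by omega
    have hrow : PySem.List.pyGetD matrix i [] = matrix.getD i.toNat [] := by
      rw [PySem.List.pyGetD_eq_getElem matrix [] h0 (by omega), List.getD_eq_getElem _ _ hit]
    exact pv_zone _ n a b P hP ha hb hbn (by rw [hrow]; exact hlen)
  refine congrArg₂ _ ?_ (congrArg₂ _ ?_ (congrArg₂ _ ?_ (congrArg₂ _ ?_ rfl))) <;>
    (refine congrArg List.sum (List.map_congr_left fun i hi => ?_)
     rw [PySem.List.mem_pyRange_one] at hi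
     have hit : i.toNat < matrix.length := by omega
     have hL := hpre i.toNat hit
     simp only [pvNeed] at hL)
  · exact hzone i (i + 1) (n - 1 - i) _ _ hi.1 hi.2 (fun j _ _ => by omega)
      (by omega) (by omega) (by omega) (by split_ifs at hL <;> omega)
  · exact hzone i (n - i) i _ _ hi.1 hi.2 (fun j _ _ => by omega)
      (by omega) (by omega) (by omega) (by split_ifs at hL <;> omega)
  · exact hzone i 0 (min i (n - 1 - i)) _ _ hi.1 hi.2 (fun j hj0 hjn => by omega)
      (by omega) (by omega) (by omega) (by split_ifs at hL <;> omega)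
  · exact hzone i (max i (n - 1 - i) + 1) n _ _ hi.1 hi.2 (fun j hj0 hjn => by omega)
      (by omega) (by omega) (by omega) (by split_ifs at hL <;> omega)
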